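-- pv_equiv track=rewrite | github.com/Chemokoren/Algorithms-1 | GFG/Arrays/Arrangement Rearrangement/replace_every_array_element_by_multiplication_of_previous_and_next.py | replace_current
-- ===== SOURCE A (Python) =====
-- def replace_current(arr):
-- 	n =len(arr)
--
-- 	if n <=1:
-- 		return
-- 	prev =None
-- 	for i in range(n):
-- 		if i ==0:
-- 			new_val =arr[i] *arr[i+1]
-- 		elif i == n-1:
-- 			new_val =prev *arr[-1]
-- 		else:
-- 			new_val = prev * arr[i+1]
-- 		prev =arr[i]
-- 		arr[i] =new_val
--
--
-- 	return arr
-- ===== SOURCE B (Python) =====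
-- def replace_current(arr):
--     if len(arr) <= 1:
--         return None
--     left = [arr[0]] + arr[:-1]
--     right = arr[1:] + [arr[-1]]
--     arr[:] = [p * q for p, q in zip(left, right)]
--     return arr
-- ===== Notes on version B (the rewrite author's own statement) =====
-- stated objective: simpler
-- what changed: Replaces the indexed loop with its prev tracker and per-index branching by building two shifted copies of the original list (left/right neighbors with ends folded back) and combining them elementwise with zip.
import Mathlib
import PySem

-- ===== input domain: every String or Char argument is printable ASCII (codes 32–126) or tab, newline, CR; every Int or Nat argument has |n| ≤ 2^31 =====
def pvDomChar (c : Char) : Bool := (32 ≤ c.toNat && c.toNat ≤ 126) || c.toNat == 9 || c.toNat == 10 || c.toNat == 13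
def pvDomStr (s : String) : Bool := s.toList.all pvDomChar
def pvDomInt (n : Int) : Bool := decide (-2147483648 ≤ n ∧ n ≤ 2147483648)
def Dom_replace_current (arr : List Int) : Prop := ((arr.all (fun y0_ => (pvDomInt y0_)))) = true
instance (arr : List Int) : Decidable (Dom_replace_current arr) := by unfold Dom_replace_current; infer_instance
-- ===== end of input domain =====

-- B replaces A's indexed loop (prev tracker + per-index branching) by two shifted copies of the
-- original list combined elementwise; objective: simpler. A mutates arr in place and B mirrors
-- that (arr[:] = ...); the equivalence proved here is about the RETURN value.

-- ===== PORT A =====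
-- loop body of A's 'for i in range(n)': state (prev, arr); n is the captured original length
def stepA (n : Int) (st : Option Int × List Int) (i : Int) : Option Int × List Int :=
  let new_val :=
    if i = 0 then PySem.List.pyGetD st.2 i 0 * PySem.List.pyGetD st.2 (i + 1) 0
    else if i = n - 1 then st.1.getD 0 * PySem.List.pyGetD st.2 (-1) 0
    else st.1.getD 0 * PySem.List.pyGetD st.2 (i + 1) 0
  -- prev = arr[i]; arr[i] = new_val  (all indices are in range: 0 ≤ i < n)
  (some (PySem.List.pyGetD st.2 i 0), PySem.List.pySetD st.2 i new_val)

def replace_current (arr : List Int) : Option (List Int) :=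
  let n : Int := arr.length
  if n ≤ 1 then none
  else
    some ((PySem.List.pyRange 0 n 1).foldl (stepA n) (none, arr)).2

-- ===== PORT B =====
def replace_current_alt (arr : List Int) : Option (List Int) :=
  if arr.length ≤ 1 then none
  else
    let left := [PySem.List.pyGetD arr 0 0] ++ PySem.List.slice arr none (some (-1))
    let right := PySem.List.slice arr (some 1) none ++ [PySem.List.pyGetD arr (-1) 0]
    some ((left.zip right).map (fun p => p.1 * p.2))

-- ===== PRECONDITION & SPEC =====
def Spec_replace_current (arr : List Int) (out : Option (List Int)) : Prop := out = replace_current_alt arr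
instance (arr : List Int) (out : Option (List Int)) : Decidable (Spec_replace_current arr out) := by unfold Spec_replace_current; infer_instance

-- ===== CLAIM (what is proved, stated in full; the proofs are below) =====
def Claim_equal_replace_current : Prop := ∀ (arr : List Int), Dom_replace_current arr → Spec_replace_current arr (replace_current arr)

-- ===== LEMMAS AND PROOFS =====

-- B's output list, in dropLast/tail form
def target (arr : List Int) : List Int :=
  ((arr.getD 0 0 :: arr.dropLast).zip (arr.tail ++ [PySem.List.pyGetD arr (-1) 0])).map
    (fun p => p.1 * p.2)

lemma target_eq_alt (arr : List Int) (h : ¬ (arr.length : Int) ≤ 1) :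
    replace_current_alt arr = some (target arr) := by
  have h2 : 2 ≤ arr.length := by omega
  simp only [replace_current_alt, target, PySem.List.slice_to_neg_one,
    PySem.List.slice_from_one]
  rw [if_neg (by omega)]
  have : PySem.List.pyGetD arr 0 0 = arr.getD 0 0 := by
    simpa using PySem.List.pyGetD_natCast arr 0 0
  simp [this]

lemma length_target (arr : List Int) (h2 : 2 ≤ arr.length) :
    (target arr).length = arr.length := by
  simp [target, List.length_zip, List.length_dropLast, List.length_tail]
  omega

lemma target_getD (arr : List Int) (h2 : 2 ≤ arr.length) (k : Nat) (hk : k < arr.length) :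
    (target arr).getD k 0 =
      arr.getD (if k = 0 then 0 else k - 1) 0 *
      arr.getD (if k = arr.length - 1 then arr.length - 1 else k + 1) 0 := by
  have hne : arr ≠ [] := by rintro rfl; simp at h2
  have hl : k < (target arr).length := by rw [length_target arr h2]; exact hk
  rw [List.getD_eq_getElem _ _ hl]
  simp only [target, List.getElem_map, List.getElem_zip]
  congr 1
  · rcases k with _ | k
    · simp
    · have hk1 : k < arr.dropLast.length := by simp; omega
      simp only [List.getElem_cons_succ]
      rw [List.getElem_dropLast]
      rw [if_neg (by omega)]
      rw [List.getD_eq_getElem _ _ (by omega : k + 1 - 1 < arr.length)]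
      simp
  · by_cases hke : k = arr.length - 1
    · have hlen : arr.tail.length = arr.length - 1 := by simp
      rw [List.getElem_append_right (by omega)]
      rw [if_pos hke]
      simp only [hlen, hke, List.getElem_singleton]
      rw [PySem.List.pyGetD_neg_one arr 0 hne, List.getLast_eq_getElem,
        List.getD_eq_getElem _ _ (by omega : arr.length - 1 < arr.length)]
    · have hkt : k < arr.tail.length := by simp; omega
      rw [List.getElem_append_left hkt, List.getElem_tail]
      rw [if_neg hke]
      rw [List.getD_eq_getElem _ _ (by simp at hkt; omega : k + 1 < arr.length)]

-- loop invariant: after processing indices 0..k-1 the state is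
-- (some arr[k-1], first k elements of the target followed by the untouched tail of arr)
lemma loopInv (arr : List Int) (h2 : 2 ≤ arr.length) (k : Nat) (hk1 : 1 ≤ k)
    (hk : k ≤ arr.length) :
    (PySem.List.pyRange 0 (k : Int) 1).foldl (stepA arr.length) (none, arr) =
      (some (arr.getD (k - 1) 0), (target arr).take k ++ arr.drop k) := by
  induction k with
  | zero => omega
  | succ k ih =>
    rcases Nat.eq_zero_or_pos k with rfl | hpos
    · -- first iteration, i = 0
      have hr : (PySem.List.pyRange 0 ((0 + 1 : Nat) : Int) 1) = [0] := by
        simpa using PySem.List.pyRange_one_singleton (0 : Int)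
      rw [hr]
      simp only [List.foldl_cons, List.foldl_nil, stepA]
      rw [if_pos trivial]
      have hg0 : PySem.List.pyGetD arr 0 0 = arr.getD 0 0 := PySem.List.pyGetD_zero arr 0
      have hg1 : PySem.List.pyGetD arr ((0 : Int) + 1) 0 = arr.getD 1 0 := by
        have h1 : ((0 : Int) + 1) = ((1 : Nat) : Int) := by norm_num
        rw [h1, PySem.List.pyGetD_natCast]
      have hs : ∀ v : Int, PySem.List.pySetD arr (0 : Int) v = arr.set 0 v := by
        intro v
        have h0 : (0 : Int) = ((0 : Nat) : Int) := by norm_num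
        rw [h0, PySem.List.pySetD_natCast]
      rw [hg0, hg1, hs]
      refine Prod.ext ?_ ?_
      · simp
      · rw [List.set_eq_take_append_cons_drop, if_pos (by omega)]
        have htl : 0 < (target arr).length := by rw [length_target arr h2]; omega
        rw [List.take_succ_eq_append_getElem htl]
        have h0 : (target arr)[0]'htl = arr.getD 0 0 * arr.getD 1 0 := by
          have hh := target_getD arr h2 0 (by omega)
          rw [List.getD_eq_getElem _ _ htl] at hh
          simpa [show ¬ (0 = arr.length - 1) by omega] using hh
        simp [h0]
    · have hsplit : PySem.List.pyRange 0 ((k + 1 : Nat) : Int) 1 =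
          PySem.List.pyRange 0 (k : Int) 1 ++ [(k : Int)] := by
        push_cast
        exact PySem.List.pyRange_one_succ_right (by positivity)
      rw [hsplit, List.foldl_append, ih (by omega) (by omega)]
      simp only [List.foldl_cons, List.foldl_nil, stepA]
      have hktk : (List.take k (target arr)).length = k := by
        rw [List.length_take, length_target arr h2]; omega
      have hlt : k < (target arr).length := by rw [length_target arr h2]; omega
      have hgk : PySem.List.pyGetD (List.take k (target arr) ++ List.drop k arr) ((k : Nat) : Int) 0
          = arr.getD k 0 := by
        have hle : (List.take k (target arr)).length ≤ k := by rw [hktk]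
        rw [PySem.List.pyGetD_natCast, List.getD_eq_getElem?_getD,
          List.getElem?_append_right hle, hktk]
        simp [List.getElem?_drop, List.getD_eq_getElem?_getD]
      rw [if_neg (show ¬ ((k : Int) = 0) by omega)]
      have htg := target_getD arr h2 k (by omega)
      rw [if_neg (show ¬ (k = 0) by omega)] at htg
      have hset : ∀ v : Int,
          PySem.List.pySetD (List.take k (target arr) ++ List.drop k arr) ((k : Nat) : Int) v
            = List.take k (target arr) ++ v :: List.drop (k + 1) arr := by
        intro v
        rw [PySem.List.pySetD_natCast, List.set_eq_take_append_cons_drop,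
          if_pos (by simp [hktk]; omega)]
        congr 1
        · rw [List.take_append, hktk]
          simp
        · congr 1
          rw [List.drop_append, hktk]
          have hnil : List.drop (k + 1) (List.take k (target arr)) = [] := by
            apply List.drop_eq_nil_of_le
            rw [hktk]; omega
          rw [hnil, List.nil_append, List.drop_drop]
          congr 1
          omega
      have htake1 : List.take (k + 1) (target arr)
          = List.take k (target arr) ++ [(target arr)[k]'hlt] :=
        List.take_succ_eq_append_getElem hlt
      by_cases hke : k = arr.length - 1
      · rw [if_pos (show (k : Int) = (arr.length : Int) - 1 by omega)]
        have hdne : List.drop k arr ≠ [] := by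
          intro hd; have := congrArg List.length hd; simp at this; omega
        have hcne : List.take k (target arr) ++ List.drop k arr ≠ [] := by
          simp [hdne]
        rw [PySem.List.pyGetD_neg_one _ 0 hcne]
        have hlastcur : (List.take k (target arr) ++ List.drop k arr).getLast hcne
            = arr.getLast (by rintro rfl; simp at h2) := by
          rw [List.getLast_append_of_ne_nil hcne hdne]
          exact List.getLast_drop hdne
        rw [hlastcur]
        have hval : (some (arr.getD (k - 1) 0)).getD 0 * arr.getLast (by rintro rfl; simp at h2)
            = (target arr)[k]'hlt := by
          rw [← List.getD_eq_getElem _ _ hlt, htg, if_pos hke]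
          rw [List.getLast_eq_getElem, List.getD_eq_getElem _ _ (by omega : arr.length - 1 < arr.length)]
          simp
        rw [hval, hgk, hset, htake1, List.append_assoc]
        simp
      · rw [if_neg (show ¬ ((k : Int) = (arr.length : Int) - 1) by omega)]
        have hg1 : PySem.List.pyGetD (List.take k (target arr) ++ List.drop k arr) ((k : Int) + 1) 0
            = arr.getD (k + 1) 0 := by
          have hc : ((k : Int) + 1) = ((k + 1 : Nat) : Int) := by push_cast; ring
          have hle : (List.take k (target arr)).length ≤ k + 1 := by rw [hktk]; omega
          rw [hc, PySem.List.pyGetD_natCast, List.getD_eq_getElem?_getD,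
            List.getElem?_append_right hle, hktk]
          have : k + 1 - k = 1 := by omega
          rw [this]
          simp [List.getElem?_drop, List.getD_eq_getElem?_getD]
        have hval : (some (arr.getD (k - 1) 0)).getD 0 * arr.getD (k + 1) 0
            = (target arr)[k]'hlt := by
          rw [← List.getD_eq_getElem _ _ hlt, htg, if_neg hke]
          simp
        rw [hg1, hval, hgk, hset, htake1, List.append_assoc]
        simp

-- ===== VERDICT (by name: the statement is the Claim_ definition above) =====
theorem replace_current_spec : Claim_equal_replace_current := by
  intro arr _
  unfold Spec_replace_current replace_current
  by_cases h : (arr.length : Int) ≤ 1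
  · simp only [replace_current_alt]
    rw [if_pos h, if_pos (by omega)]
  · have h2 : 2 ≤ arr.length := by omega
    rw [if_neg h, target_eq_alt arr h]
    rw [loopInv arr h2 arr.length (by omega) le_rfl]
    simp [List.take_of_length_le (le_of_eq (length_target arr h2))]
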